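-- pv_equiv track=rewrite | github.com/weibak/lessons | lesson-07/solution-03.py | get_products_stats
-- ===== SOURCE A (Python) =====
-- def get_products_stats(data: list) -> dict:
--     """Generate list of products."""
--     result = {}
--     for row in data:
--         # If we already found product previously, aggregate new values
--         if row[1] in result:
--             result[row[1]]["bought_count"] += row[2]
--             result[row[1]]["total_price"] += row[3]
--         else:
--             # Otherwise set initial values
--             result[row[1]] = {
--                 "bought_count": row[2],
--                 "total_price": row[3],
--             }
--     return result
-- ===== SOURCE B (Python) =====
-- def get_products_stats(data: list) -> dict:
--     """Generate list of products."""
--     # First pass: group rows by product name, preserving first-appearance order.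
--     groups = {}
--     for row in data:
--         groups.setdefault(row[1], []).append(row)
--     # Second pass: fold each group from its first row into the stats record.
--     result = {}
--     for name, rows in groups.items():
--         bought = rows[0][2]
--         total = rows[0][3]
--         for r in rows[1:]:
--             bought += r[2]
--             total += r[3]
--         result[name] = {"bought_count": bought, "total_price": total}
--     return result
-- ===== Notes on version B (the rewrite author's own statement) =====
-- stated objective: alternative
-- what changed: Replaces A's incremental single-scan dict of running stat-dicts by a two-pass build-table-then-fold shape: first group the rows per product name with setdefault/append (keeping first-seen order), then fold each group's counts and prices starting from its first row.
import Mathlib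
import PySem

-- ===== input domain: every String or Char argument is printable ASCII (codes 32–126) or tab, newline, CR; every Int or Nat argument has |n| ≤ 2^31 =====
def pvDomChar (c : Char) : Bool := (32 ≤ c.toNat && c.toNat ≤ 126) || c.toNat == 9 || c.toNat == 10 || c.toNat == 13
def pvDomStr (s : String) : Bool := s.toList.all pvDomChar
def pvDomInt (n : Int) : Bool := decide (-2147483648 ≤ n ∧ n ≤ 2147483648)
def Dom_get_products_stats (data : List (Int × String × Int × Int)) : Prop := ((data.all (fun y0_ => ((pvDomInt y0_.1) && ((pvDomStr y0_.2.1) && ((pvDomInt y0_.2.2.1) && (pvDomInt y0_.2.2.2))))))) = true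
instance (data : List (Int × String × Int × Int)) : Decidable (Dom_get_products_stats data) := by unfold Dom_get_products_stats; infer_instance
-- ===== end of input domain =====

-- B replaces A's incremental single-scan of running stat-dicts by a two-pass
-- group-then-fold shape (same cost; a different decomposition). Return values only:
-- A mutates nothing observable.


-- ===== PORT A =====
-- A: one scan; on a seen product, += on its stat-dict entries; else insert the initial stat-dict.
def get_products_stats (data : List (Int × String × Int × Int)) : List (String × List (String × Int)) :=
  (data.foldl
    (fun result row =>
      if result.contains row.2.1 then
        -- result[row[1]]["bought_count"] += row[2]; result[row[1]]["total_price"] += row[3]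
        result.modify row.2.1 PySem.Dict.empty (fun st =>
          (st.modify "bought_count" 0 (· + row.2.2.1)).modify "total_price" 0 (· + row.2.2.2))
      else
        result.insert row.2.1
          (PySem.Dict.ofList [("bought_count", row.2.2.1), ("total_price", row.2.2.2)]))
    (PySem.Dict.empty : PySem.Dict String (PySem.Dict String Int))).items.map
      (fun p => (p.1, p.2.items))

-- ===== PORT B =====
-- B: first pass groups the rows per name (setdefault(k, []).append(row) is exactly
-- modify k [] (· ++ [row])); second pass folds each group from its first row.
def get_products_stats_alt (data : List (Int × String × Int × Int)) : List (String × List (String × Int)) :=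
  let groups : PySem.Dict String (List (Int × String × Int × Int)) :=
    data.foldl (fun g row => g.modify row.2.1 [] (· ++ [row])) PySem.Dict.empty
  groups.items.map (fun p =>
    match p.2 with
    | [] => (p.1, [("bought_count", 0), ("total_price", 0)])  -- unreachable: every group is nonempty
    | r :: rest =>
        (p.1, [("bought_count", rest.foldl (fun acc q => acc + q.2.2.1) r.2.2.1),
               ("total_price",  rest.foldl (fun acc q => acc + q.2.2.2) r.2.2.2)]))

-- ===== PRECONDITION & SPEC =====
def Spec_get_products_stats (data : List (Int × String × Int × Int)) (out : List (String × List (String × Int))) : Prop := out = get_products_stats_alt data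
instance (data : List (Int × String × Int × Int)) (out : List (String × List (String × Int))) : Decidable (Spec_get_products_stats data out) := by unfold Spec_get_products_stats; infer_instance

-- ===== CLAIM (what is proved, stated in full; the proofs are below) =====
def Claim_equal_get_products_stats : Prop := ∀ (data : List (Int × String × Int × Int)), Dom_get_products_stats data → Spec_get_products_stats data (get_products_stats data)

-- ===== LEMMAS AND PROOFS =====

-- the stats record of a group of rows, as an items list
def pvStats (rows : List (Int × String × Int × Int)) : List (String × Int) :=
  [("bought_count", (rows.map (·.2.2.1)).sum), ("total_price", (rows.map (·.2.2.2)).sum)]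

-- turn one group entry into the corresponding A-side entry
def pvEmap (p : String × List (Int × String × Int × Int)) : String × PySem.Dict String Int :=
  (p.1, PySem.Dict.mk (pvStats p.2))

theorem pvContains_map (l : List (String × List (Int × String × Int × Int))) (k : String) :
    (PySem.Dict.mk (l.map pvEmap)).contains k = (PySem.Dict.mk l).contains k := by
  simp [PySem.Dict.contains, List.any_map, pvEmap, Function.comp_def]

theorem pvGet?_map (l : List (String × List (Int × String × Int × Int))) (k : String) :
    (PySem.Dict.mk (l.map pvEmap)).get? k
      = ((PySem.Dict.mk l).get? k).map (fun rows => PySem.Dict.mk (pvStats rows)) := by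
  simp only [PySem.Dict.get?, List.find?_map]
  cases hf : List.find? ((fun p => p.1 == k) ∘ pvEmap) l with
  | none =>
    have : List.find? (fun p => p.1 == k) l = none := by
      rw [List.find?_eq_none] at hf ⊢
      intro x hx; simpa [pvEmap] using hf x hx
    simp [this]
  | some q =>
    have : List.find? (fun p => p.1 == k) l = some q := by
      have h1 := hf
      rw [show ((fun p => p.1 == k) ∘ pvEmap) = (fun p : String × List (Int × String × Int × Int) => p.1 == k) from by
        funext p; simp [pvEmap]] at h1
      exact h1
    simp [this, pvEmap]

theorem pvFoldl_add (f : (Int × String × Int × Int) → Int) :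
    ∀ (rest : List (Int × String × Int × Int)) (a : Int),
      rest.foldl (fun acc q => acc + f q) a = a + (rest.map f).sum := by
  intro rest
  induction rest with
  | nil => intro a; simp
  | cons r t ih => intro a; simp [ih]; ring

-- the initial stat-dict A inserts for a fresh product is the stats record of its one-row group
theorem pvOfList_single (row : Int × String × Int × Int) :
    (PySem.Dict.ofList [("bought_count", row.2.2.1), ("total_price", row.2.2.2)] : PySem.Dict String Int)
      = PySem.Dict.mk (pvStats [row]) := by
  simp [PySem.Dict.ofList, PySem.Dict.update, PySem.Dict.insert, PySem.Dict.contains,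
    PySem.Dict.empty, pvStats]

-- A's two in-place += updates on a stats record extend the group by one row
theorem pvBump (rows : List (Int × String × Int × Int)) (row : Int × String × Int × Int) :
    ((PySem.Dict.mk (pvStats rows)).modify "bought_count" 0 (· + row.2.2.1)).modify
        "total_price" 0 (· + row.2.2.2)
      = PySem.Dict.mk (pvStats (rows ++ [row])) := by
  simp [PySem.Dict.modify, PySem.Dict.insert, PySem.Dict.contains, PySem.Dict.getD,
    PySem.Dict.get?, pvStats]

-- the joint invariant: A's running dict is the pvEmap image of B's groups dict
theorem pvInv :
    ∀ (data : List (Int × String × Int × Int)) (l : List (String × List (Int × String × Int × Int))),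
      data.foldl
        (fun result row =>
          if result.contains row.2.1 then
            result.modify row.2.1 PySem.Dict.empty (fun st =>
              (st.modify "bought_count" 0 (· + row.2.2.1)).modify "total_price" 0 (· + row.2.2.2))
          else
            result.insert row.2.1
              (PySem.Dict.ofList [("bought_count", row.2.2.1), ("total_price", row.2.2.2)]))
        (PySem.Dict.mk (l.map pvEmap))
      = PySem.Dict.mk
          ((data.foldl (fun g row => g.modify row.2.1 [] (· ++ [row])) (PySem.Dict.mk l)).items.map pvEmap) := by
  intro data
  induction data with
  | nil => intro l; rfl
  | cons row rest ih =>
    intro l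
    have hstep :
        (if (PySem.Dict.mk (l.map pvEmap)).contains row.2.1 then
          (PySem.Dict.mk (l.map pvEmap)).modify row.2.1 PySem.Dict.empty (fun st =>
            (st.modify "bought_count" 0 (· + row.2.2.1)).modify "total_price" 0 (· + row.2.2.2))
        else
          (PySem.Dict.mk (l.map pvEmap)).insert row.2.1
            (PySem.Dict.ofList [("bought_count", row.2.2.1), ("total_price", row.2.2.2)]))
        = PySem.Dict.mk
            ((((PySem.Dict.mk l).modify row.2.1 [] (· ++ [row])) :
                PySem.Dict String (List (Int × String × Int × Int))).items.map pvEmap) := by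
      by_cases h : (PySem.Dict.mk l).contains row.2.1 = true
      · -- seen key: both sides replace the entry in place
        obtain ⟨rows, hg⟩ : ∃ rows, (PySem.Dict.mk l).get? row.2.1 = some rows := by
          have hc := PySem.Dict.contains_eq_isSome_get? (d := PySem.Dict.mk l) (k := row.2.1)
          rw [h] at hc
          cases hx : (PySem.Dict.mk l).get? row.2.1 with
          | none => rw [hx] at hc; simp at hc
          | some v => exact ⟨v, rfl⟩
        rw [if_pos (by rw [pvContains_map]; exact h)]
        conv_lhs => rw [PySem.Dict.modify.eq_def]
        conv_rhs => rw [PySem.Dict.modify.eq_def]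
        have hvalA : (PySem.Dict.mk (l.map pvEmap)).getD row.2.1 PySem.Dict.empty
            = PySem.Dict.mk (pvStats rows) := by
          simp [PySem.Dict.getD, hg, pvGet?_map]
        have hvalB : (PySem.Dict.mk l).getD row.2.1 [] = rows := by
          simp [PySem.Dict.getD, hg]
        rw [hvalA, hvalB, pvBump]
        simp only [PySem.Dict.insert, pvContains_map, h, if_true, List.map_map]
        congr 1
        apply List.map_congr_left
        intro p _
        by_cases hp : p.1 = row.2.1
        · simp [pvEmap, hp]
        · simp [pvEmap, hp]
      · -- fresh key: both sides append the new entry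
        rw [Bool.not_eq_true] at h
        have hany : (l.any fun p => p.1 == row.2.1) = false := by
          simpa [PySem.Dict.contains] using h
        have hfind : List.find? (fun p => p.1 == row.2.1) l = none := by
          rw [List.find?_eq_none]
          intro x hx
          have := List.any_eq_false.mp hany x hx
          simpa using this
        rw [if_neg (by rw [pvContains_map, h]; simp)]
        simp only [PySem.Dict.modify, PySem.Dict.getD, PySem.Dict.get?, hfind,
          Option.map_none, Option.getD_none, List.nil_append]
        simp only [PySem.Dict.insert, PySem.Dict.contains,
          hany, Bool.false_eq_true, if_false, List.map_append, List.map_cons, List.map_nil]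
        rw [pvOfList_single]
        have hany2 : ((List.map pvEmap l).any fun p => p.1 == row.2.1) = false := by
          simpa [List.any_map, pvEmap, Function.comp_def] using hany
        simp [hany2, pvEmap]
    rw [List.foldl_cons, List.foldl_cons, hstep, ih]

theorem get_products_stats_spec : Claim_equal_get_products_stats := by
  intro data _
  unfold Spec_get_products_stats get_products_stats get_products_stats_alt
  have h := pvInv data []
  simp only [List.map_nil] at h
  rw [show (PySem.Dict.empty : PySem.Dict String (PySem.Dict String Int)) = PySem.Dict.mk [] from rfl,
      show (PySem.Dict.empty : PySem.Dict String (List (Int × String × Int × Int))) = PySem.Dict.mk [] from rfl,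
      h]
  simp only [List.map_map]
  apply List.map_congr_left
  intro p _
  cases hrows : p.2 with
  | nil => simp [pvEmap, pvStats, hrows]
  | cons r t =>
    simp [pvEmap, pvStats, hrows, pvFoldl_add]
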